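-- pv_equiv track=rewrite | github.com/jovisly/AdventOfCode | 2023/day_03/part1.py | get_sum_valid_digits
-- ===== SOURCE A (Python) =====
-- def get_digits(input_string):
--     """Given one line, identify the digits and their indices.
--
--     Example input: "467..114..", which should return [(467, 0, 2), (114, 5, 7)].
--     """
--     digits = []
--     curr_digit = None
--     for i in range(len(input_string)):
--         if input_string[i].isdigit() and curr_digit is None:
--             curr_digit = (input_string[i], i, i)
--         elif input_string[i].isdigit() and curr_digit is not None:
--             curr_digit = (curr_digit[0] + input_string[i], curr_digit[1], i)
--         else:
--             # Reset.
--             if curr_digit is not None: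
--                 digits.append((int(curr_digit[0]), curr_digit[1], curr_digit[2]))
--                 curr_digit = None
--
--     # If we have something, dump it.
--     if curr_digit is not None:
--         digits.append((int(curr_digit[0]), curr_digit[1], curr_digit[2]))
--         curr_digit = None
--
--     return digits
--
-- def has_neighboring_symbols(neighboring_line, digits):
--     """Returns a boolean for whether there are any symbols next to digits.
--
--     Given a neighboring line, and the digits in the format of (467, 0, 2),
--     identify if there is a symbol between the indices 0 and 3.
--     """
--     list_chars = list(neighboring_line)
--     is_char_a_neighboring_symbol = [
--         True
--         if not char.isdigit() and char != "."
--         and index >= digits[1] - 1 and index <= digits[2] + 1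
--         else False
--         for index, char in enumerate(list_chars)
--     ]
--     return any(is_char_a_neighboring_symbol)
--
-- def has_neighboring_symbols_this_line(this_line, digits):
--     inds = [digits[1] - 1, digits[2] + 1]
--     inds = [ind for ind in inds if ind >= 0 and ind < len(this_line)]
--     chars = list(this_line)
--     is_symbol = [
--         True if not char.isdigit() and char != "." and (ind in inds) else False
--         for ind, char in enumerate(chars)
--     ]
--     return any(is_symbol)
--
-- def has_neighboring_symbols_all_lines(neighboring_lines, this_line, digits):
--     arr_output = [
--         has_neighboring_symbols(l, digits) for l in neighboring_lines
--     ]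
--     return any(arr_output) or has_neighboring_symbols_this_line(this_line, digits)
--
-- def get_sum_valid_digits(lines, line_num):
--     """Given all the lines, and one of the line, get the valid digits."""
--     line =  lines[line_num]
--     arr_digits = get_digits(line)
--
--     neighboring_lines_indices = [line_num - 1, line_num + 1]
--     # Only accept the valid line numbers.
--     neighboring_lines_indices = [l for l in neighboring_lines_indices if l >= 0 and l < len(lines)]
--     neighboring_lines = [lines[i] for i in neighboring_lines_indices]
--
--     sum = 0
--     for digits in arr_digits:
--         is_valid = has_neighboring_symbols_all_lines(
--             neighboring_lines, lines[line_num], digits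
--         )
--         if is_valid:
--             sum += digits[0]
--
--     return sum
-- ===== SOURCE B (Python) =====
-- def get_sum_valid_digits(lines, line_num):
--     """Given all the lines, and one of the line, get the valid digits."""
--     line = lines[line_num]
--     n = len(lines)
--     rows = [lines[r] for r in (line_num - 1, line_num + 1) if 0 <= r < n]
--     rows.append(line)
--     total = 0
--     i = 0
--     length = len(line)
--     while i < length:
--         if line[i].isdigit():
--             j = i
--             while j < length and line[j].isdigit():
--                 j += 1
--             if any(not c.isdigit() and c != "."
--                    for row in rows
--                    for c in row[max(0, i - 1):j + 1]):
--                 total += int(line[i:j])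
--             i = j
--         else:
--             i += 1
--     return total
-- ===== Notes on version B (the rewrite author's own statement) =====
-- stated objective: simpler
-- what changed: A's stateful three-branch digit scanner plus three per-line symbol-test helpers (each scanning the whole neighboring line with an enumerate comprehension) are replaced by one run-grouping sweep that finds each maximal digit run and tests only the clamped bounding-box slice of the three relevant rows.
import Mathlib
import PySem

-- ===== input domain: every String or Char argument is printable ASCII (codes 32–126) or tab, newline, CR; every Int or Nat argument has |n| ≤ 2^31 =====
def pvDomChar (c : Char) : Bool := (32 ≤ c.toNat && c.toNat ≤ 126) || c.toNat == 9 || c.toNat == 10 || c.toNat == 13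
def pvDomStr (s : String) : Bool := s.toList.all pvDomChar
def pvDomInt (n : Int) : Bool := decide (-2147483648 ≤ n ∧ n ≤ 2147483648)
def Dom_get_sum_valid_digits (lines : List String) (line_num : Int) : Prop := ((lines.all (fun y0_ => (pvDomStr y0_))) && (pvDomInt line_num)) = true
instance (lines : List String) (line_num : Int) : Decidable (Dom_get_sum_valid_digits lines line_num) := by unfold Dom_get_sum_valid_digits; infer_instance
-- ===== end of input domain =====

-- B merges A's stateful digit-scanner and three symbol-test helpers into one run-grouping
-- sweep with a single bounding-box scan per number (objective: simpler; return value only,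
-- neither program mutates its arguments).

-- ===== PORT A =====
-- Python str.isdigit() on a single character is Char.isDigit on the ASCII domain (Dom).
-- Loop body of get_digits: one step of the fold over (index, char) pairs; branch order as in A.
def getDigitsStep (st : List (Int × Int × Int) × Option (List Char × Int × Int))
    (p : Int × Char) : List (Int × Int × Int) × Option (List Char × Int × Int) :=
  if p.2.isDigit ∧ st.2 = none then
    (st.1, some ([p.2], p.1, p.1))
  else if p.2.isDigit ∧ st.2 ≠ none then
    match st.2 with
    | some (s, a, _) => (st.1, some (s ++ [p.2], a, p.1))
    | none => (st.1, st.2)  -- unreachable under the branch guard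
  else
    match st.2 with
    | some (s, a, b) => (st.1 ++ [((PySem.Int.ofChars? s).getD 0, a, b)], none)  -- int() on a nonempty digit string never raises
    | none => (st.1, st.2)

-- 'for i in range(len(s))' reading s[i] is the fold over enumerate(s).
def getDigits (input_string : List Char) : List (Int × Int × Int) :=
  let r := (PySem.List.enumerate input_string 0).foldl getDigitsStep ([], none)
  match r.2 with
  | some (s, a, b) => r.1 ++ [((PySem.Int.ofChars? s).getD 0, a, b)]
  | none => r.1

def hasNeighboringSymbols (neighboring_line : List Char) (digits : Int × Int × Int) : Bool :=
  let flags := (PySem.List.enumerate neighboring_line 0).map (fun p =>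
    if (p.2.isDigit = false ∧ p.2 ≠ '.' ∧ digits.2.1 - 1 ≤ p.1 ∧ p.1 ≤ digits.2.2 + 1)
    then true else false)
  flags.any id

def hasNeighboringSymbolsThisLine (this_line : List Char) (digits : Int × Int × Int) : Bool :=
  let inds := [digits.2.1 - 1, digits.2.2 + 1]
  let inds := inds.filter (fun ind => decide (0 ≤ ind ∧ ind < PySem.List.len this_line))
  let flags := (PySem.List.enumerate this_line 0).map (fun p =>
    if (p.2.isDigit = false ∧ p.2 ≠ '.' ∧ p.1 ∈ inds) then true else false)
  flags.any id

def hasNeighboringSymbolsAllLines (neighboring_lines : List (List Char))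
    (this_line : List Char) (digits : Int × Int × Int) : Bool :=
  let arr_output := neighboring_lines.map (fun l => hasNeighboringSymbols l digits)
  arr_output.any id || hasNeighboringSymbolsThisLine this_line digits

def get_sum_valid_digits (lines : List String) (line_num : Int) : Int :=
  -- lines[line_num]: pyGet? is some under Pre_; the default is never used there
  let line := ((PySem.List.pyGet? lines line_num).getD "").toList
  let arr_digits := getDigits line
  let nbr_idx := ([line_num - 1, line_num + 1]).filter
      (fun l => decide (0 ≤ l ∧ l < PySem.List.len lines))
  let neighboring_lines := nbr_idx.map (fun i => ((PySem.List.pyGet? lines i).getD "").toList)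
  arr_digits.foldl
    (fun sum digits =>
      if hasNeighboringSymbolsAllLines neighboring_lines line digits then sum + digits.1 else sum)
    0

-- ===== PORT B =====
def altSymbol (c : Char) : Bool := !c.isDigit && !(c == '.')

-- any(... for row in rows for c in row[max(0,i-1):j+1])
def altBoxAny (rows : List (List Char)) (i j : Nat) : Bool :=
  rows.any (fun row =>
    (PySem.List.slice row (some (max 0 ((i : Int) - 1))) (some ((j : Int) + 1))).any altSymbol)

-- inner 'while j < length and line[j].isdigit(): j += 1'
def altScan (cs : List Char) (j : Nat) : Nat :=
  if h : j < cs.length then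
    if cs[j].isDigit then altScan cs (j + 1) else j
  else j
termination_by cs.length - j

theorem altScan_ge (cs : List Char) (j : Nat) : j ≤ altScan cs j := by
  unfold altScan
  split
  · split
    · have := altScan_ge cs (j + 1); omega
    · omega
  · omega
termination_by cs.length - j

-- outer 'while i < length'
def altGo (rows : List (List Char)) (cs : List Char) (i : Nat) (total : Int) : Int :=
  if h : i < cs.length then
    if hd : cs[i].isDigit then
      let j := altScan cs i
      let total' :=
        if altBoxAny rows i j then
          total + (PySem.Int.ofChars? (PySem.List.slice cs (some (i : Int)) (some (j : Int)))).getD 0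
        else total
      altGo rows cs j total'
    else altGo rows cs (i + 1) total
  else total
termination_by cs.length - i
decreasing_by
  · have h1 : i + 1 ≤ altScan cs (i + 1) := altScan_ge cs (i + 1)
    have h2 : altScan cs i = altScan cs (i + 1) := by
      rw [altScan]; simp [h, hd]
    omega
  · omega

def get_sum_valid_digits_alt (lines : List String) (line_num : Int) : Int :=
  let line := ((PySem.List.pyGet? lines line_num).getD "").toList
  let n := PySem.List.len lines
  let rows := ([line_num - 1, line_num + 1].filter (fun r => decide (0 ≤ r ∧ r < n))).map
      (fun r => ((PySem.List.pyGet? lines r).getD "").toList)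
  let rows := rows ++ [line]
  altGo rows line 0 0

-- ===== PRECONDITION & SPEC =====
-- Pre_ excludes exactly the inputs where A raises IndexError on lines[line_num].
def Pre_get_sum_valid_digits (lines : List String) (line_num : Int) : Prop :=
  PySem.Raise.InRange lines.length line_num
instance (lines : List String) (line_num : Int) : Decidable (Pre_get_sum_valid_digits lines line_num) := by unfold Pre_get_sum_valid_digits; infer_instance

def pvWitness_get_sum_valid_digits : List String × Int := (["467..114..", "...*......"], 0)

def Spec_get_sum_valid_digits (lines : List String) (line_num : Int) (out : Int) : Prop := out = get_sum_valid_digits_alt lines line_num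
instance (lines : List String) (line_num : Int) (out : Int) : Decidable (Spec_get_sum_valid_digits lines line_num out) := by unfold Spec_get_sum_valid_digits; infer_instance

-- ===== CLAIM (what is proved, stated in full; the proofs are below) =====
def Claim_equal_get_sum_valid_digits : Prop := ∀ (lines : List String) (line_num : Int), Dom_get_sum_valid_digits lines line_num → Pre_get_sum_valid_digits lines line_num → Spec_get_sum_valid_digits lines line_num (get_sum_valid_digits lines line_num)

-- ===== LEMMAS AND PROOFS =====

-- Maximal digit runs of a line starting at absolute position k: the common
-- characterization both ports are reduced to.
def runsA : List Char → Nat → List (Int × Int × Int)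
  | [], _ => []
  | c :: rest, k =>
    if c.isDigit then
      ((PySem.Int.ofChars? ((c :: rest).takeWhile Char.isDigit)).getD 0, (k : Int),
        (k : Int) + ((c :: rest).takeWhile Char.isDigit).length - 1)
        :: runsA ((c :: rest).dropWhile Char.isDigit) (k + ((c :: rest).takeWhile Char.isDigit).length)
    else runsA rest (k + 1)
termination_by xs _ => xs.length
decreasing_by
  · rename_i hdig
    rw [List.dropWhile_cons_of_pos hdig]
    have := List.length_dropWhile_le (p := Char.isDigit) (l := rest)
    simp at this ⊢; omega
  · simp

-- continuation of A's scanner from an in-progress state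
def contA : Option (List Char × Int × Int) → List Char → Nat → List (Int × Int × Int)
  | none, cs, k => runsA cs k
  | some (s, a, b), cs, k =>
    ((PySem.Int.ofChars? (s ++ cs.takeWhile Char.isDigit)).getD 0, a,
      if (cs.takeWhile Char.isDigit).isEmpty then b
      else (k : Int) + (cs.takeWhile Char.isDigit).length - 1)
      :: runsA (cs.dropWhile Char.isDigit) (k + (cs.takeWhile Char.isDigit).length)

def finalizeA (r : List (Int × Int × Int) × Option (List Char × Int × Int)) :
    List (Int × Int × Int) :=
  match r.2 with
  | some (s, a, b) => r.1 ++ [((PySem.Int.ofChars? s).getD 0, a, b)]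
  | none => r.1

theorem foldA (cs : List Char) : ∀ (k : Nat) (D : List (Int × Int × Int))
    (st : Option (List Char × Int × Int)),
    finalizeA ((PySem.List.enumerate cs (k : Int)).foldl getDigitsStep (D, st)) =
      D ++ contA st cs k := by
  induction cs with
  | nil =>
    intro k D st
    cases st with
    | none => simp [PySem.List.enumerate_nil, finalizeA, contA, runsA]
    | some t => rcases t with ⟨s, a, b⟩; simp [PySem.List.enumerate_nil, finalizeA, contA, runsA]
  | cons c rest ih =>
    intro k D st
    rw [PySem.List.enumerate_cons]
    by_cases hd : c.isDigit
    · cases st with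
      | none =>
        have hstep : getDigitsStep (D, none) ((k : Int), c) = (D, some ([c], (k : Int), (k : Int))) := by
          simp [getDigitsStep, hd]
        rw [List.foldl_cons, hstep]
        have : ((k : Int) + 1) = ((k + 1 : Nat) : Int) := by push_cast; ring
        rw [this, ih (k + 1) D (some ([c], (k : Int), (k : Int)))]
        simp only [contA, runsA, hd, if_pos, List.takeWhile_cons_of_pos hd,
          List.dropWhile_cons_of_pos hd]
        refine congrArg (D ++ ·) ?_
        congr 1
        · simp only [List.singleton_append, List.length_cons, Prod.mk.injEq]
          refine ⟨trivial, trivial, ?_⟩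
          by_cases he : (rest.takeWhile Char.isDigit).isEmpty
          · have h0 : rest.takeWhile Char.isDigit = [] := List.isEmpty_iff.mp he
            simp [h0]
          · simp [he]; ring
        · congr 1; simp; omega
      | some t =>
        rcases t with ⟨s, a, b⟩
        have hstep : getDigitsStep (D, some (s, a, b)) ((k : Int), c) =
            (D, some (s ++ [c], a, (k : Int))) := by
          simp [getDigitsStep, hd]
        rw [List.foldl_cons, hstep]
        have : ((k : Int) + 1) = ((k + 1 : Nat) : Int) := by push_cast; ring
        rw [this, ih (k + 1) D (some (s ++ [c], a, (k : Int)))]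
        simp only [contA, List.takeWhile_cons_of_pos hd, List.dropWhile_cons_of_pos hd]
        refine congrArg (D ++ ·) ?_
        congr 1
        · simp only [List.append_assoc, List.singleton_append, List.length_cons,
            List.isEmpty_cons, Prod.mk.injEq]
          refine ⟨trivial, trivial, ?_⟩
          by_cases he : (rest.takeWhile Char.isDigit).isEmpty
          · have h0 : rest.takeWhile Char.isDigit = [] := List.isEmpty_iff.mp he
            simp [h0]
          · simp [he]; ring
        · congr 1; simp; omega
    · cases st with
      | none =>
        have hstep : getDigitsStep (D, none) ((k : Int), c) = (D, none) := by
          simp [getDigitsStep, hd]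
        rw [List.foldl_cons, hstep]
        have : ((k : Int) + 1) = ((k + 1 : Nat) : Int) := by push_cast; ring
        rw [this, ih (k + 1) D none]
        simp [contA, runsA, hd]
      | some t =>
        rcases t with ⟨s, a, b⟩
        have hstep : getDigitsStep (D, some (s, a, b)) ((k : Int), c) =
            (D ++ [((PySem.Int.ofChars? s).getD 0, a, b)], none) := by
          simp [getDigitsStep, hd]
        rw [List.foldl_cons, hstep]
        have : ((k : Int) + 1) = ((k + 1 : Nat) : Int) := by push_cast; ring
        rw [this, ih (k + 1) _ none]
        simp [contA, runsA, hd, List.takeWhile_cons_of_neg hd, List.dropWhile_cons_of_neg hd]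

theorem getDigits_eq (cs : List Char) : getDigits cs = runsA cs 0 := by
  have h := foldA cs 0 [] none
  simpa [finalizeA, contA, getDigits] using h

-- takeWhile/dropWhile as take/drop at the run boundary (glue used throughout)
theorem pvTakeWhile_len_le (xs : List Char) (p : Char → Bool) :
    (xs.takeWhile p).length ≤ xs.length := by
  rw [List.takeWhile_eq_take_findIdx_not]; simp

theorem pvTakeWhile_eq_take (xs : List Char) (p : Char → Bool) :
    xs.takeWhile p = xs.take (xs.takeWhile p).length := by
  rw [List.takeWhile_eq_take_findIdx_not, List.length_take,
    Nat.min_eq_left List.findIdx_le_length]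

theorem pvDropWhile_eq_drop (xs : List Char) (p : Char → Bool) :
    xs.dropWhile p = xs.drop (xs.takeWhile p).length := by
  rw [List.dropWhile_eq_drop_findIdx_not, List.takeWhile_eq_take_findIdx_not, List.length_take,
    Nat.min_eq_left List.findIdx_le_length]

-- the bounding-box test of one row / all rows, with Int endpoints of the run
def rowAny (row : List Char) (a b : Int) : Bool :=
  (PySem.List.slice row (some (max 0 (a - 1))) (some (b + 2))).any altSymbol

def boxAnyI (rows : List (List Char)) (a b : Int) : Bool :=
  rows.any (fun row => rowAny row a b)

theorem altBoxAny_eq (rows : List (List Char)) (i j : Nat) :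
    altBoxAny rows i j = boxAnyI rows (i : Int) ((j : Int) - 1) := by
  unfold altBoxAny boxAnyI rowAny
  have h2 : ((j : Int) - 1) + 2 = (j : Int) + 1 := by ring
  rw [h2]

theorem altScan_eq (cs : List Char) (j : Nat) :
    altScan cs j = j + ((cs.drop j).takeWhile Char.isDigit).length := by
  rw [altScan]
  split
  · rename_i h
    rw [List.drop_eq_getElem_cons h]
    split
    · rename_i hd
      rw [altScan_eq cs (j + 1)]
      rw [List.takeWhile_cons_of_pos hd]
      simp; omega
    · rename_i hd
      rw [List.takeWhile_cons_of_neg hd]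
      simp
  · rename_i h
    rw [List.drop_eq_nil_of_le (by omega)]
    simp
termination_by cs.length - j
decreasing_by omega

theorem altGo_eq (rows : List (List Char)) (cs : List Char) (i : Nat) (total : Int) :
    altGo rows cs i total = total +
      ((runsA (cs.drop i) i).map
        (fun d => if boxAnyI rows d.2.1 d.2.2 = true then d.1 else 0)).sum := by
  rw [altGo]
  split
  · rename_i h
    split
    · rename_i hd
      -- the run starting at i
      have htw := altScan_eq cs i
      set tw := (cs.drop i).takeWhile Char.isDigit with htwdef
      have htw1 : 1 ≤ tw.length := by
        rw [htwdef, List.drop_eq_getElem_cons h, List.takeWhile_cons_of_pos hd]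
        simp
      have hdropi : cs.drop i = cs[i] :: cs.drop (i + 1) := List.drop_eq_getElem_cons h
      have hruns : runsA (cs.drop i) i =
          ((PySem.Int.ofChars? tw).getD 0, (i : Int), (i : Int) + tw.length - 1)
            :: runsA (cs.drop (altScan cs i)) (altScan cs i) := by
        rw [hdropi]
        rw [runsA]
        rw [if_pos hd, ← hdropi]
        have hdw : (cs.drop i).dropWhile Char.isDigit = cs.drop (altScan cs i) := by
          rw [pvDropWhile_eq_drop, List.drop_drop, htw]
        rw [hdw, htw]
      have hval : PySem.List.slice cs (some (i : Int)) (some ((altScan cs i : Nat) : Int)) = tw := by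
        rw [PySem.List.slice_natCast, htw]
        have : i + tw.length - i = tw.length := by omega
        rw [this, ← pvTakeWhile_eq_take]
      have hbox : altBoxAny rows i (altScan cs i) =
          boxAnyI rows (i : Int) ((i : Int) + tw.length - 1) := by
        rw [altBoxAny_eq]
        congr 1
        rw [htw]; push_cast; ring
      rw [altGo_eq rows cs (altScan cs i), hruns]
      simp only [List.map_cons, List.sum_cons, hval, hbox]
      split <;> ring
    · rename_i hd
      rw [altGo_eq rows cs (i + 1)]
      have : runsA (cs.drop i) i = runsA (cs.drop (i + 1)) (i + 1) := by
        rw [List.drop_eq_getElem_cons h, runsA, if_neg hd]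
      rw [this]
  · rename_i h
    rw [List.drop_eq_nil_of_le (by omega), runsA]
    simp
termination_by cs.length - i
decreasing_by
  · omega
  · rw [htw]
    rw [htwdef] at htw1
    omega

-- every run produced by runsA lies inside the string and consists of digits
theorem runsA_mem : ∀ (xs : List Char) (k : Nat) (d : Int × Int × Int), d ∈ runsA xs k →
    ∃ a b : Nat, d.2.1 = (a : Int) ∧ d.2.2 = (b : Int) ∧ k ≤ a ∧ a ≤ b ∧ b < k + xs.length ∧
      ∀ m : Nat, a ≤ m → m ≤ b → ∃ ch : Char, xs[m - k]? = some ch ∧ ch.isDigit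
  | [], k, d => by simp [runsA]
  | c :: rest, k, d => by
    intro hmem
    by_cases hd : c.isDigit
    · rw [runsA, if_pos hd] at hmem
      have hTlen : 1 ≤ ((c :: rest).takeWhile Char.isDigit).length := by
        rw [List.takeWhile_cons_of_pos hd]; simp
      have hTle : ((c :: rest).takeWhile Char.isDigit).length ≤ (c :: rest).length :=
        pvTakeWhile_len_le _ _
      rcases List.mem_cons.mp hmem with heq | htail
      · refine ⟨k, k + ((c :: rest).takeWhile Char.isDigit).length - 1, ?_, ?_,
          le_refl _, by omega, by omega, ?_⟩
        · rw [heq]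
        · rw [heq]; simp; omega
        · intro m hm1 hm2
          have h1 : m - k < ((c :: rest).takeWhile Char.isDigit).length := by omega
          obtain ⟨t, ht⟩ := List.takeWhile_prefix (p := Char.isDigit) (l := c :: rest)
          refine ⟨((c :: rest).takeWhile Char.isDigit)[m - k]'h1, ?_, ?_⟩
          · conv_lhs => rw [← ht]
            rw [List.getElem?_append_left h1]
            exact List.getElem?_eq_getElem h1
          · exact List.mem_takeWhile_imp (List.getElem_mem h1)
      · obtain ⟨a, b, h1, h2, h3, h4, h5, h6⟩ := runsA_mem _ _ d htail
        have hdw : (c :: rest).dropWhile Char.isDigit =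
            (c :: rest).drop ((c :: rest).takeWhile Char.isDigit).length := pvDropWhile_eq_drop _ _
        have hdwlen : ((c :: rest).dropWhile Char.isDigit).length =
            (c :: rest).length - ((c :: rest).takeWhile Char.isDigit).length := by
          rw [hdw, List.length_drop]
        refine ⟨a, b, h1, h2, by omega, h4, by omega, ?_⟩
        intro m hm1 hm2
        obtain ⟨ch, hch, hdig⟩ := h6 m hm1 hm2
        refine ⟨ch, ?_, hdig⟩
        rw [hdw, List.getElem?_drop] at hch
        have : ((c :: rest).takeWhile Char.isDigit).length +
            (m - (k + ((c :: rest).takeWhile Char.isDigit).length)) = m - k := by omega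
        rw [this] at hch
        exact hch
    · rw [runsA, if_neg hd] at hmem
      obtain ⟨a, b, h1, h2, h3, h4, h5, h6⟩ := runsA_mem _ _ d hmem
      refine ⟨a, b, h1, h2, by omega, h4, by simp at h5 ⊢; omega, ?_⟩
      intro m hm1 hm2
      obtain ⟨ch, hch, hdig⟩ := h6 m hm1 hm2
      refine ⟨ch, ?_, hdig⟩
      have hidx : m - k = (m - (k + 1)) + 1 := by omega
      rw [hidx, List.getElem?_cons_succ]
      exact hch
termination_by xs _ _ => xs.length
decreasing_by
  · rw [pvDropWhile_eq_drop, List.length_drop]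
    have := hTlen
    simp at this ⊢
    omega
  · simp

-- existence of a symbol in the window [a-1, b+1] of a row
def symWin (l : List Char) (a b : Nat) : Prop :=
  ∃ k : Nat, ∃ ch : Char, l[k]? = some ch ∧
    altSymbol ch = true ∧ (a : Int) - 1 ≤ (k : Int) ∧ (k : Int) ≤ (b : Int) + 1

theorem altSymbol_iff (c : Char) : altSymbol c = true ↔ c.isDigit = false ∧ c ≠ '.' := by
  simp [altSymbol]

theorem anyTakeDrop (l : List Char) (u v : Nat) (p : Char → Bool) :
    ((l.drop u).take v).any p = true ↔
      ∃ k : Nat, u ≤ k ∧ k < u + v ∧ ∃ ch : Char, l[k]? = some ch ∧ p ch = true := by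
  rw [List.any_eq_true]
  constructor
  · rintro ⟨x, hx, hp⟩
    obtain ⟨n, hn⟩ := List.mem_iff_getElem?.mp hx
    have hsome := hn
    rw [List.getElem?_eq_some_iff] at hsome
    obtain ⟨hlt, _⟩ := hsome
    have hn' : n < v ∧ u + n < l.length := by
      simp [List.length_take, List.length_drop] at hlt; omega
    refine ⟨u + n, by omega, by omega, x, ?_, hp⟩
    rw [← hn, List.getElem?_take_of_lt hn'.1, List.getElem?_drop]
  · rintro ⟨k, h1, h2, ch, hch, hp⟩
    refine ⟨ch, ?_, hp⟩
    apply List.mem_iff_getElem?.mpr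
    refine ⟨k - u, ?_⟩
    rw [List.getElem?_take_of_lt (by omega), List.getElem?_drop]
    rw [show u + (k - u) = k by omega]
    exact hch

theorem rowAny_iff (l : List Char) (a b : Nat) :
    rowAny l (a : Int) (b : Int) = true ↔ symWin l a b := by
  unfold rowAny
  have hmax : max 0 ((a : Int) - 1) = ((a - 1 : Nat) : Int) := by omega
  have hb2 : (b : Int) + 2 = ((b + 2 : Nat) : Int) := by omega
  rw [hmax, hb2, PySem.List.slice_natCast, anyTakeDrop]
  unfold symWin
  constructor
  · rintro ⟨k, h1, h2, ch, hch, hp⟩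
    exact ⟨k, ch, hch, hp, by omega, by omega⟩
  · rintro ⟨k, ch, hch, hp, h1, h2⟩
    have hk : k < l.length := (List.getElem?_eq_some_iff.mp hch).1
    exact ⟨k, by omega, by omega, ch, hch, hp⟩

theorem hnsym_iff (l : List Char) (d : Int × Int × Int) (a b : Nat)
    (ha : d.2.1 = (a : Int)) (hb : d.2.2 = (b : Int)) :
    hasNeighboringSymbols l d = true ↔ symWin l a b := by
  unfold hasNeighboringSymbols symWin
  simp only [List.any_eq_true, List.mem_map, PySem.List.mem_enumerate_iff, ha, hb, id_eq]
  constructor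
  · rintro ⟨x, ⟨p, ⟨n, hn, hpn⟩, hpx⟩, hx⟩
    subst hpn
    simp only [zero_add] at hpx
    by_cases hc : (l[n].isDigit = false ∧ l[n] ≠ '.' ∧
        (a : Int) - 1 ≤ (n : Int) ∧ (n : Int) ≤ (b : Int) + 1)
    · obtain ⟨h1, h2, h3, h4⟩ := hc
      exact ⟨n, l[n], List.getElem?_eq_getElem hn, (altSymbol_iff _).mpr ⟨h1, h2⟩, h3, h4⟩
    · rw [if_neg hc] at hpx
      subst hpx
      simp at hx
  · rintro ⟨k, ch, hch, hp, h1, h2⟩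
    obtain ⟨hk, hv⟩ := List.getElem?_eq_some_iff.mp hch
    obtain ⟨hd1, hd2⟩ := (altSymbol_iff _).mp hp
    subst hv
    refine ⟨true, ⟨((0 : Int) + (k : Int), l[k]), ⟨k, hk, rfl⟩, ?_⟩, rfl⟩
    rw [if_pos]
    exact ⟨hd1, hd2, by omega, by omega⟩

theorem hthis_iff (l : List Char) (d : Int × Int × Int) (a b : Nat)
    (ha : d.2.1 = (a : Int)) (hb : d.2.2 = (b : Int))
    (hab : a ≤ b) (_hblt : b < l.length)
    (hdig : ∀ m : Nat, a ≤ m → m ≤ b → ∃ ch : Char, l[m]? = some ch ∧ ch.isDigit) :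
    hasNeighboringSymbolsThisLine l d = true ↔ symWin l a b := by
  unfold hasNeighboringSymbolsThisLine symWin
  simp only [List.any_eq_true, List.mem_map, PySem.List.mem_enumerate_iff, ha, hb, id_eq,
    List.mem_filter, List.mem_cons, List.not_mem_nil, or_false, PySem.List.len_eq,
    decide_eq_true_eq]
  constructor
  · rintro ⟨x, ⟨p, ⟨n, hn, hpn⟩, hpx⟩, hx⟩
    subst hpn
    simp only [zero_add] at hpx
    by_cases hc : (l[n].isDigit = false ∧ l[n] ≠ '.' ∧
        (((n : Int) = (a : Int) - 1 ∨ (n : Int) = (b : Int) + 1) ∧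
          0 ≤ (n : Int) ∧ (n : Int) < (l.length : Int)))
    · obtain ⟨h1, h2, h3, _⟩ := hc
      refine ⟨n, l[n], List.getElem?_eq_getElem hn, (altSymbol_iff _).mpr ⟨h1, h2⟩, ?_, ?_⟩
      · rcases h3 with h3 | h3 <;> omega
      · rcases h3 with h3 | h3 <;> omega
    · rw [if_neg hc] at hpx
      subst hpx
      simp at hx
  · rintro ⟨k, ch, hch, hp, h1, h2⟩
    obtain ⟨hk, hv⟩ := List.getElem?_eq_some_iff.mp hch
    obtain ⟨hd1, hd2⟩ := (altSymbol_iff _).mp hp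
    subst hv
    -- k cannot lie inside the digit run, so it is one of the two endpoints
    have hk2 : (k : Int) = (a : Int) - 1 ∨ (k : Int) = (b : Int) + 1 := by
      by_contra hcon
      rw [not_or] at hcon
      have hin : a ≤ k ∧ k ≤ b := by omega
      obtain ⟨ch', hch', hdm⟩ := hdig k hin.1 hin.2
      rw [List.getElem?_eq_getElem hk] at hch'
      have : ch' = l[k] := by injection hch'.symm
      rw [this] at hdm
      simp [hdm] at hd1
    refine ⟨true, ⟨((0 : Int) + (k : Int), l[k]), ⟨k, hk, rfl⟩, ?_⟩, rfl⟩
    rw [if_pos]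
    refine ⟨hd1, hd2, ?_, ?_, ?_⟩
    · simpa using hk2
    · simp
    · simp; omega

-- per-run equivalence of A's three-helper test and B's bounding-box test
theorem valid_eq (nbrs : List (List Char)) (ln : List Char) (d : Int × Int × Int)
    (a b : Nat) (ha : d.2.1 = (a : Int)) (hb : d.2.2 = (b : Int))
    (hab : a ≤ b) (hblt : b < ln.length)
    (hdig : ∀ m : Nat, a ≤ m → m ≤ b → ∃ ch : Char, ln[m]? = some ch ∧ ch.isDigit) :
    hasNeighboringSymbolsAllLines nbrs ln d = boxAnyI (nbrs ++ [ln]) d.2.1 d.2.2 := by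
  unfold hasNeighboringSymbolsAllLines boxAnyI
  rw [List.any_append]
  have e1 : (nbrs.map (fun l => hasNeighboringSymbols l d)).any id =
      nbrs.any (fun row => rowAny row d.2.1 d.2.2) := by
    rw [List.any_map]
    apply PySem.List.any_congr_mem
    intro l _
    rw [Bool.eq_iff_iff]
    simp only [Function.comp_apply, id_eq, ha, hb]
    rw [hnsym_iff l d a b ha hb, rowAny_iff]
  have e2 : hasNeighboringSymbolsThisLine ln d = rowAny ln d.2.1 d.2.2 := by
    rw [Bool.eq_iff_iff, ha, hb, rowAny_iff]
    exact hthis_iff ln d a b ha hb hab hblt hdig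
  simp only [e1, e2]
  simp

-- A's summing loop as a mapped sum
theorem foldl_ite_add (C : (Int × Int × Int) → Bool) (arr : List (Int × Int × Int)) (s0 : Int) :
    arr.foldl (fun s d => if C d = true then s + d.1 else s) s0 =
      s0 + (arr.map (fun d => if C d = true then d.1 else 0)).sum := by
  have h := PySem.List.foldl_congr_mem
    (l := arr) (init := s0)
    (f := fun s d => if C d = true then s + d.1 else s)
    (g := fun s d => s + (if C d = true then d.1 else 0))
    (by
      intro acc x _
      show (if C x = true then acc + x.1 else acc) = acc + (if C x = true then x.1 else 0)
      split <;> simp)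
  rw [h, PySem.List.foldl_add]

-- ===== VERDICT (by name: the statement is the Claim_ definition above) =====
theorem get_sum_valid_digits_spec : Claim_equal_get_sum_valid_digits := by
  intro lines line_num _hdom _hpre
  unfold Spec_get_sum_valid_digits
  unfold get_sum_valid_digits get_sum_valid_digits_alt
  simp only []
  set ln := ((PySem.List.pyGet? lines line_num).getD "").toList with hln
  set nbrs := (([line_num - 1, line_num + 1]).filter
      (fun l => decide (0 ≤ l ∧ l < PySem.List.len lines))).map
      (fun i => ((PySem.List.pyGet? lines i).getD "").toList) with hnbrs
  rw [getDigits_eq, foldl_ite_add (fun d => hasNeighboringSymbolsAllLines nbrs ln d)]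
  rw [altGo_eq]
  rw [List.drop_zero]
  have hcongr : ∀ d ∈ runsA ln 0,
      (if hasNeighboringSymbolsAllLines nbrs ln d = true then d.1 else 0) =
      (if boxAnyI (nbrs ++ [ln]) d.2.1 d.2.2 = true then d.1 else 0) := by
    intro d hd
    obtain ⟨a, b, ha, hb, _, hab, hblt, hdig⟩ := runsA_mem ln 0 d hd
    have hblt' : b < ln.length := by simpa using hblt
    have hdig' : ∀ m : Nat, a ≤ m → m ≤ b → ∃ ch : Char, ln[m]? = some ch ∧ ch.isDigit := by
      intro m h1 h2
      simpa using hdig m h1 h2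
    rw [valid_eq nbrs ln d a b ha hb hab hblt' hdig']
  rw [List.map_congr_left hcongr]
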